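-- pv_equiv track=rewrite | github.com/k-khvastow/OctreeNCA_Video | v_create_video_ioct2d_warm_m1init.py | _build_octree_resolutions
-- ===== SOURCE A (Python) =====
-- from typing import Dict, List, Optional, Tuple
--
-- def _build_octree_resolutions(
--     input_size: Tuple[int, int],
--     steps: int,
--     final_steps: int,
--     first_steps_multiplier: int = 2,
-- ):
--     h, w = input_size
--     resolutions = []
--     for _ in range(5):
--         resolutions.append([h, w])
--         h = max(1, h // 2)
--         w = max(1, w // 2)
--
--     res_and_steps = []
--     for i, res in enumerate(resolutions):
--         if i == 0:
--             res_and_steps.append([res, steps * first_steps_multiplier])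
--         elif i == len(resolutions) - 1:
--             res_and_steps.append([res, final_steps])
--         else:
--             res_and_steps.append([res, steps])
--     return res_and_steps
-- ===== SOURCE B (Python) =====
-- def _build_octree_resolutions(
--     input_size,
--     steps,
--     final_steps,
--     first_steps_multiplier=2,
-- ):
--     h, w = input_size
--     step_table = [steps * first_steps_multiplier, steps, steps, steps, final_steps]
--     return [
--         [[h, w] if i == 0 else [max(1, h // 2**i), max(1, w // 2**i)], step_table[i]]
--         for i in range(5)
--     ]
-- ===== Notes on version B (the rewrite author's own statement) =====
-- stated objective: simpler
-- what changed: B computes each row by a closed form instead of A's stateful loops: resolution i is max(1, size // 2**i) (no maintained (h,w) state, no intermediate resolutions list) and the step comes from a literal 5-entry step table indexed by i, replacing A's first/last branch chain.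
import Mathlib
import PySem

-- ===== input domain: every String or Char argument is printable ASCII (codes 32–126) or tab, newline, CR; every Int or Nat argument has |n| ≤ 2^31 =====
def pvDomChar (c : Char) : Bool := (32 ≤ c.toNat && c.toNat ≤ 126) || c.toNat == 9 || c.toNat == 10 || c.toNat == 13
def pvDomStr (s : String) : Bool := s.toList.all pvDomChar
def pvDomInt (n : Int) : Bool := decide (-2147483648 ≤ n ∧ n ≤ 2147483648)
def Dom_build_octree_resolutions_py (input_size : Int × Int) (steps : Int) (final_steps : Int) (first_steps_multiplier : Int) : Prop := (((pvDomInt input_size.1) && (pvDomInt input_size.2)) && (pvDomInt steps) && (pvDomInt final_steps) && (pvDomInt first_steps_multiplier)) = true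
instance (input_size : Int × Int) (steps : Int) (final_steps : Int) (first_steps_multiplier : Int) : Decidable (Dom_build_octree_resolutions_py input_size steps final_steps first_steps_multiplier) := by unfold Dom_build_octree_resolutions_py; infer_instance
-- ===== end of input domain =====

-- B replaces A's stateful two-pass loop by a closed-form per-index map (resolution i = max(1, size // 2**i), steps from a literal table); simpler, same output.

-- ===== PORT A =====
def build_octree_resolutions_py (input_size : Int × Int) (steps : Int) (final_steps : Int) (first_steps_multiplier : Int) : List (List Int × Int) :=
  let st := (List.range 5).foldl
    (fun (acc : List (List Int) × Int × Int) _ =>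
      (acc.1 ++ [[acc.2.1, acc.2.2]],
       max 1 (PySem.Int.floordiv acc.2.1 2),
       max 1 (PySem.Int.floordiv acc.2.2 2)))
    ([], input_size.1, input_size.2)
  let resolutions := st.1
  (PySem.List.enumerate resolutions).foldl
    (fun acc p =>
      if p.1 = 0 then acc ++ [(p.2, steps * first_steps_multiplier)]
      else if p.1 = (resolutions.length : Int) - 1 then acc ++ [(p.2, final_steps)]
      else acc ++ [(p.2, steps)])
    []

-- ===== PORT B =====
def build_octree_resolutions_py_alt (input_size : Int × Int) (steps : Int) (final_steps : Int) (first_steps_multiplier : Int) : List (List Int × Int) :=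
  let h := input_size.1
  let w := input_size.2
  let step_table : List Int := [steps * first_steps_multiplier, steps, steps, steps, final_steps]
  (List.range 5).map (fun i =>
    ((if i = 0 then [h, w]
      else [max 1 (PySem.Int.floordiv h ((2:Int)^i)), max 1 (PySem.Int.floordiv w ((2:Int)^i))]),
     -- step_table[i]: i < 5 always, so Python's indexing never raises; getD is exact here
     step_table.getD i 0))

-- ===== PRECONDITION & SPEC =====
def Spec_build_octree_resolutions_py (input_size : Int × Int) (steps : Int) (final_steps : Int) (first_steps_multiplier : Int) (out : List (List Int × Int)) : Prop := out = build_octree_resolutions_py_alt input_size steps final_steps first_steps_multiplier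
instance (input_size : Int × Int) (steps : Int) (final_steps : Int) (first_steps_multiplier : Int) (out : List (List Int × Int)) : Decidable (Spec_build_octree_resolutions_py input_size steps final_steps first_steps_multiplier out) := by unfold Spec_build_octree_resolutions_py; infer_instance

-- ===== CLAIM (what is proved, stated in full; the proofs are below) =====
def Claim_equal_build_octree_resolutions_py : Prop := ∀ (input_size : Int × Int) (steps : Int) (final_steps : Int) (first_steps_multiplier : Int), Dom_build_octree_resolutions_py input_size steps final_steps first_steps_multiplier → Spec_build_octree_resolutions_py input_size steps final_steps first_steps_multiplier (build_octree_resolutions_py input_size steps final_steps first_steps_multiplier)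

-- ===== LEMMAS AND PROOFS =====
theorem pv_fd2 (a : Int) : PySem.Int.floordiv a 2 = a / 2 := PySem.Int.floordiv_eq_ediv_of_pos (by norm_num)

theorem pv_half2 (a : Int) : max 1 (max 1 (a / 2) / 2) = max 1 (a / 4) := by omega
theorem pv_half3 (a : Int) : max 1 (max 1 (a / 4) / 2) = max 1 (a / 8) := by omega
theorem pv_half4 (a : Int) : max 1 (max 1 (a / 8) / 2) = max 1 (a / 16) := by omega

-- ===== VERDICT (by name: the statement is the Claim_ definition above) =====
theorem build_octree_resolutions_py_spec : Claim_equal_build_octree_resolutions_py := by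
  intro input_size steps final_steps first_steps_multiplier _
  unfold Spec_build_octree_resolutions_py build_octree_resolutions_py build_octree_resolutions_py_alt
  simp only [List.range, List.range.loop, List.foldl, List.map, PySem.List.enumerate,
    List.length, List.nil_append, List.cons_append, List.getD, List.getElem?_cons_zero,
    List.getElem?_cons_succ, Option.getD_some, pv_fd2]
  norm_num [pv_half2, pv_half3, pv_half4]
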